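-- pv_equiv track=rewrite | github.com/elreimundo/adventofcode2024 | day02/src/parser.py | parse
-- ===== SOURCE A (Python) =====
-- def parse(lines: list[str]) -> list[list[int]]:
-- 	records = []
-- 	for line in lines:
-- 		record = []
-- 		current_number = None
-- 		for char in line.strip():
-- 			if char.isnumeric():
-- 				if current_number is None:
-- 					current_number = int(char)
-- 				else:
-- 					current_number = current_number * 10 + int(char)
-- 			else:
-- 				if current_number is not None:
-- 					record.append(current_number)
-- 					current_number = None
-- 		if current_number is not None:
-- 			record.append(current_number)
-- 		if len(record) > 0:
-- 			records.append(record)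
-- 	return records
-- ===== SOURCE B (Python) =====
-- def parse(lines: list[str]) -> list[list[int]]:
--     records = []
--     for line in lines:
--         s = line.strip()
--         record = []
--         i, n = 0, len(s)
--         while i < n:
--             if s[i].isnumeric():
--                 j = i
--                 while j < n and s[j].isnumeric():
--                     j += 1
--                 record.append(int(s[i:j]))
--                 i = j
--             else:
--                 i += 1
--         if record:
--             records.append(record)
--     return records
-- ===== Notes on version B (the rewrite author's own statement) =====
-- stated objective: idiomatic
-- what changed: Replaces A's per-character accumulator state machine (current_number = current_number*10 + int(char) with a None sentinel) by a two-pointer scan that takes each maximal digit run as a slice and converts it with one int() call.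
import Mathlib
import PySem

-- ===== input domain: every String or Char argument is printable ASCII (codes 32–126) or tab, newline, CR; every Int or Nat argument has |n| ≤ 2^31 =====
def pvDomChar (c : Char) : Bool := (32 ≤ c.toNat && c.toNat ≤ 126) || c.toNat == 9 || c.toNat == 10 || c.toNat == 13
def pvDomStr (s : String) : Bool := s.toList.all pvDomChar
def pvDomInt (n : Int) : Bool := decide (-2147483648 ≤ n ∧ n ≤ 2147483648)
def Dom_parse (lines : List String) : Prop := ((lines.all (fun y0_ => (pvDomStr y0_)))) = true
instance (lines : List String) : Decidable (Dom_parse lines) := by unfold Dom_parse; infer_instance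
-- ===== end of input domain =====

-- B replaces A's per-character accumulator state machine by a two-pointer scan over maximal
-- digit runs, converting each run at once (idiomatic; same cost).


-- ===== PORT A =====
-- char.isnumeric() ported as PySem.Chars.isdigit: they coincide on the printable-ASCII domain.
-- int(char) for a single decimal digit ported as (c.toNat - 48 : Int): exact there.
def parseDigitInt (c : Char) : Int := (c.toNat : Int) - 48

def parseStepA (st : List Int × Option Int) (c : Char) : List Int × Option Int :=
  if PySem.Chars.isdigit c then
    match st.2 with
    | none => (st.1, some (parseDigitInt c))
    | some v => (st.1, some (v * 10 + parseDigitInt c))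
  else
    match st.2 with
    | some v => (st.1 ++ [v], none)
    | none => st

def parseLineA (cs : List Char) : List Int :=
  let st := cs.foldl parseStepA ([], none)
  match st.2 with
  | some v => st.1 ++ [v]
  | none => st.1

def parse (lines : List String) : List (List Int) :=
  lines.foldl (fun records line =>
    let record := parseLineA (PySem.Chars.strip line.toList)
    if record.length > 0 then records ++ [record] else records) []

-- ===== PORT B =====
-- int(s[i:j]) for a nonempty run of decimal digits ported as the base-10 fold: exact there.
def parseRunVal (run : List Char) : Int := run.foldl (fun a c => a * 10 + parseDigitInt c) 0

-- the inner while-loops of Source B: skip non-digits; at a digit, take the maximal digit run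
def parseLineB : List Char → List Int
  | [] => []
  | c :: cs =>
    if PySem.Chars.isdigit c then
      parseRunVal (c :: cs.takeWhile PySem.Chars.isdigit)
        :: parseLineB (cs.dropWhile PySem.Chars.isdigit)
    else parseLineB cs
  termination_by cs => cs.length
  decreasing_by
  · exact Nat.lt_succ_of_le (List.length_dropWhile_le _ _)
  · exact Nat.lt_succ_self _

def parse_alt (lines : List String) : List (List Int) :=
  lines.foldl (fun records line =>
    let record := parseLineB (PySem.Chars.strip line.toList)
    if record ≠ [] then records ++ [record] else records) []

-- ===== PRECONDITION & SPEC =====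
def Spec_parse (lines : List String) (out : List (List Int)) : Prop := out = parse_alt lines
instance (lines : List String) (out : List (List Int)) : Decidable (Spec_parse lines out) := by unfold Spec_parse; infer_instance

-- ===== CLAIM (what is proved, stated in full; the proofs are below) =====
def Claim_equal_parse : Prop := ∀ (lines : List String), Dom_parse lines → Spec_parse lines (parse lines)

-- ===== LEMMAS AND PROOFS =====

def parseFinish (st : List Int × Option Int) : List Int :=
  match st.2 with
  | some v => st.1 ++ [v]
  | none => st.1

-- the joint loop invariant: A's state machine from state (rec, none) yields rec ++ B's result;
-- from (rec, some v) it finishes the current run with accumulator v and continues as B.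
theorem parseLine_inv (cs : List Char) :
    (∀ rec, parseFinish (cs.foldl parseStepA (rec, none)) = rec ++ parseLineB cs) ∧
    (∀ rec v, parseFinish (cs.foldl parseStepA (rec, some v)) =
      rec ++ ((cs.takeWhile PySem.Chars.isdigit).foldl (fun a c => a * 10 + parseDigitInt c) v
              :: parseLineB (cs.dropWhile PySem.Chars.isdigit))) := by
  induction cs with
  | nil => constructor <;> intros <;> simp [parseFinish, parseLineB]
  | cons c cs ih =>
    constructor
    · intro rec
      by_cases h : PySem.Chars.isdigit c = true
      · simp only [List.foldl_cons, parseStepA, h, if_pos, parseLineB]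
        rw [ih.2]
        simp [parseRunVal]
      · simp only [List.foldl_cons, parseStepA, if_neg h]
        rw [ih.1 rec]
        simp [parseLineB, h]
    · intro rec v
      by_cases h : PySem.Chars.isdigit c = true
      · simp only [List.foldl_cons, parseStepA, if_pos h]
        rw [ih.2]
        simp [h]
      · simp only [List.foldl_cons, parseStepA, if_neg h]
        rw [ih.1]
        simp [parseLineB, h]

theorem parseLine_eq (cs : List Char) : parseLineA cs = parseLineB cs := by
  have h := (parseLine_inv cs).1 []
  simpa [parseLineA, parseFinish] using h

theorem parse_step_eq :
    (fun (records : List (List Int)) (line : String) =>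
      let record := parseLineA (PySem.Chars.strip line.toList)
      if record.length > 0 then records ++ [record] else records) =
    (fun (records : List (List Int)) (line : String) =>
      let record := parseLineB (PySem.Chars.strip line.toList)
      if record ≠ [] then records ++ [record] else records) := by
  funext records line
  simp only [parseLine_eq, List.length_pos_iff_ne_nil]

-- ===== VERDICT (by name: the statement is the Claim_ definition above) =====
theorem parse_spec : Claim_equal_parse := by
  intro lines _
  show parse lines = parse_alt lines
  unfold parse parse_alt
  rw [parse_step_eq]
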